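-- pv_equiv track=rewrite | github.com/prestigeworldwidecr/CodeSignal | Exploring the Dimensions A Beginner's Guide to Multidimensional Arrays in Python/unit2/practice5.py | bookshelfTraversal
-- ===== SOURCE A (Python) =====
-- def bookshelfTraversal(bookshelves):
-- # {
--     # TODO: Determine the number of rows and columns in 'bookshelves'
--     total_rows = len(bookshelves)
--     total_columns = len(bookshelves[0])
--     current_row = total_rows - 1
--     current_column = total_columns - 1
--     direction = -1
--     traversal_path = []
--
--     # TODO: Traverse the bookshelves using a zigzag pattern; start from the bottom right
--     for _ in range(total_rows * total_columns) :
--     # {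
--         traversal_path.append(bookshelves[current_row][current_column])
--
--         if((current_row == 0 and direction == -1) or (current_row == total_rows - 1 and direction == 1))  :
--         # {
--             direction = direction * -1
--             current_column = current_column - 1
--         # }
--
--         else :
--         # {
--             current_row = current_row + direction
--         # }
--
--     # }
--
--
--     return traversal_path
-- ===== SOURCE B (Python) =====
-- def bookshelfTraversal(bookshelves):
--     total_rows = len(bookshelves)
--     total_columns = len(bookshelves[0])
--     traversal_path = []
--     for k in range(total_columns):
--         c = total_columns - 1 - k
--         if k % 2 == 0:
--             rows = range(total_rows - 1, -1, -1)
--         else: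
--             rows = range(total_rows)
--         for r in rows:
--             traversal_path.append(bookshelves[r][c])
--     return traversal_path
-- ===== Notes on version B (the rewrite author's own statement) =====
-- stated objective: simpler
-- what changed: Replaces A's single loop with a mutable (row, column, direction) state machine and boundary-flip branch by plain nested loops: columns right-to-left, each column scanned bottom-to-top or top-to-bottom according to the column's parity.
import Mathlib
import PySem

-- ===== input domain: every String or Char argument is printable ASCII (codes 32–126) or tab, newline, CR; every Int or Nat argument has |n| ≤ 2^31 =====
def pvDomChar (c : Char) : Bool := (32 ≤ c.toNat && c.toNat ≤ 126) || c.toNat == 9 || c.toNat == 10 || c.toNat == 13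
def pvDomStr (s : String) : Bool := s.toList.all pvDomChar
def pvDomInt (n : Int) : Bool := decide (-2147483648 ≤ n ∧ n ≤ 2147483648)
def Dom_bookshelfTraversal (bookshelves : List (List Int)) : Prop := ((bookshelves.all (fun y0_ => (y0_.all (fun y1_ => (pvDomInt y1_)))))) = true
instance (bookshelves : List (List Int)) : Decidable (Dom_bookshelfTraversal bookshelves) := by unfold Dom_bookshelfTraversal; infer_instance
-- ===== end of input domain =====

-- B replaces A's (row, column, direction) state machine by plain nested loops
-- (columns right-to-left, row direction by column parity): simpler, same cost.

-- ===== PORT A =====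
-- bookshelves[i] / row[j]: inside Pre_ every index A accesses is in range, so
-- pyGetD with a default is exact there (Python raises exactly outside Pre_).
def pvGetA (bookshelves : List (List Int)) (r c : Int) : Int :=
  PySem.List.pyGetD (PySem.List.pyGetD bookshelves r []) c 0

-- one iteration of A's loop body on the state (current_row, current_column, direction, traversal_path)
def pvStepA (bookshelves : List (List Int)) (totalRows : Int)
    (s : Int × Int × Int × List Int) : Int × Int × Int × List Int :=
  let (cr, cc, d, path) := s
  let path := path ++ [pvGetA bookshelves cr cc]
  if (cr == 0 && d == -1) || (cr == totalRows - 1 && d == 1) then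
    (cr, cc - 1, d * (-1), path)
  else
    (cr + d, cc, d, path)

def bookshelfTraversal (bookshelves : List (List Int)) : List Int :=
  let total_rows : Int := bookshelves.length
  let total_columns : Int := (PySem.List.pyGetD bookshelves 0 []).length
  let fin :=
    (PySem.List.pyRange 0 (total_rows * total_columns) 1).foldl
      (fun s _ => pvStepA bookshelves total_rows s)
      (total_rows - 1, total_columns - 1, -1, ([] : List Int))
  fin.2.2.2

-- ===== PORT B =====
def bookshelfTraversal_alt (bookshelves : List (List Int)) : List Int :=
  let total_rows : Int := bookshelves.length
  let total_columns : Int := (PySem.List.pyGetD bookshelves 0 []).length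
  (PySem.List.pyRange 0 total_columns 1).foldl
    (fun path k =>
      let c := total_columns - 1 - k
      let rows :=
        if PySem.Int.mod k 2 == 0 then PySem.List.pyRange (total_rows - 1) (-1) (-1)
        else PySem.List.pyRange 0 total_rows 1
      rows.foldl (fun p r => p ++ [pvGetA bookshelves r c]) path)
    []

-- ===== PRECONDITION & SPEC =====
-- Pre_ excludes exactly the inputs where Python A raises IndexError: the empty
-- grid (bookshelves[0]) and ragged grids with a row shorter than the first row.
def Pre_bookshelfTraversal (bookshelves : List (List Int)) : Prop :=
  bookshelves ≠ [] ∧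
    ∀ row ∈ bookshelves, (PySem.List.pyGetD bookshelves 0 []).length ≤ row.length
instance (bookshelves : List (List Int)) : Decidable (Pre_bookshelfTraversal bookshelves) := by
  unfold Pre_bookshelfTraversal; infer_instance

def pvWitness_bookshelfTraversal : List (List Int) := [[1, 2, 3], [4, 5, 6]]

def Spec_bookshelfTraversal (bookshelves : List (List Int)) (out : List Int) : Prop := out = bookshelfTraversal_alt bookshelves
instance (bookshelves : List (List Int)) (out : List Int) : Decidable (Spec_bookshelfTraversal bookshelves out) := by unfold Spec_bookshelfTraversal; infer_instance

-- ===== CLAIM (what is proved, stated in full; the proofs are below) =====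
def Claim_equal_bookshelfTraversal : Prop := ∀ (bookshelves : List (List Int)), Dom_bookshelfTraversal bookshelves → Pre_bookshelfTraversal bookshelves → Spec_bookshelfTraversal bookshelves (bookshelfTraversal bookshelves)

-- ===== LEMMAS AND PROOFS =====

-- a fold of a state-only function over any list is function iteration
theorem pv_foldl_const {α σ : Type} (f : σ → σ) :
    ∀ (l : List α) (s : σ), l.foldl (fun s _ => f s) s = f^[l.length] s := by
  intro l
  induction l with
  | nil => intro s; rfl
  | cons x xs ih =>
      intro s
      simp [List.foldl_cons, ih, Function.iterate_succ_apply]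

-- the row/direction pair at the start of the k-th column pass (k columns from the right)
def pvRowOf (R : Int) (k : Nat) : Int := if k % 2 = 0 then R - 1 else 0
def pvDirOf (k : Nat) : Int := if k % 2 = 0 then -1 else 1

-- the segment one column pass produces (bottom-up resp. top-down), as A builds it
def pvSegDown (bs : List (List Int)) (c : Int) : Nat → List Int
  | 0 => [pvGetA bs 0 c]
  | j + 1 => pvGetA bs (j + 1 : Nat) c :: pvSegDown bs c j
def pvSegUp (bs : List (List Int)) (R c : Int) : Nat → List Int
  | 0 => [pvGetA bs (R - 1) c]
  | j + 1 => pvGetA bs (R - 1 - (j + 1 : Nat)) c :: pvSegUp bs R c j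
def pvSeg (bs : List (List Int)) (R : Int) (k : Nat) (c : Int) : List Int :=
  if k % 2 = 0 then pvSegDown bs c (R - 1).toNat else pvSegUp bs R c (R - 1).toNat

-- inner loop of a down pass: from row j (direction -1), j+1 steps reach (0, c-1, 1)
theorem pv_inner_down (bs : List (List Int)) (R : Int) (c : Int) :
    ∀ (j : Nat), (j : Int) < R → ∀ (p : List Int),
      (pvStepA bs R)^[j + 1] ((j : Int), c, -1, p)
        = (0, c - 1, 1, p ++ pvSegDown bs c j) := by
  intro j
  induction j with
  | zero =>
      intro _ p
      simp [pvStepA, pvSegDown]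
  | succ j ih =>
      intro hj p
      rw [Function.iterate_succ_apply]
      have hstep : pvStepA bs R ((↑(j + 1) : Int), c, -1, p)
          = ((↑(j + 1) : Int) + (-1), c, -1, p ++ [pvGetA bs (↑(j + 1) : Int) c]) := by
        simp only [pvStepA]
        have h2 : ((-1 : Int) == 1) = false := by decide
        simp [h2]
        omega
      rw [hstep]
      have hcast : ((↑(j + 1) : Int) + (-1)) = (j : Int) := by push_cast; ring
      rw [hcast, ih (by omega)]
      simp [pvSegDown]

-- inner loop of an up pass: from row R-1-j (direction 1), j+1 steps reach (R-1, c-1, -1)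
theorem pv_inner_up (bs : List (List Int)) (R : Int) (c : Int) :
    ∀ (j : Nat), (j : Int) < R → ∀ (p : List Int),
      (pvStepA bs R)^[j + 1] (R - 1 - (j : Int), c, 1, p)
        = (R - 1, c - 1, -1, p ++ pvSegUp bs R c j) := by
  intro j
  induction j with
  | zero =>
      intro _ p
      simp [pvStepA, pvSegUp]
  | succ j ih =>
      intro hj p
      rw [Function.iterate_succ_apply]
      have hstep : pvStepA bs R (R - 1 - (↑(j + 1) : Int), c, 1, p)
          = (R - 1 - (↑(j + 1) : Int) + 1, c, 1, p ++ [pvGetA bs (R - 1 - (↑(j + 1) : Int)) c]) := by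
        simp only [pvStepA]
        have h1 : ((1 : Int) == -1) = false := by decide
        simp [h1]
        omega
      rw [hstep]
      have hcast : (R - 1 - (↑(j + 1) : Int) + 1) = R - 1 - (j : Int) := by push_cast; ring
      rw [hcast, ih (by omega)]
      simp [pvSegUp]

-- one full column pass: R steps from the parity-k start, appending pvSeg
theorem pv_pass (bs : List (List Int)) (R : Int) (hR : 1 ≤ R) (k : Nat) (c : Int) (p : List Int) :
    (pvStepA bs R)^[R.toNat] (pvRowOf R k, c, pvDirOf k, p)
      = (pvRowOf R (k + 1), c - 1, pvDirOf (k + 1), p ++ pvSeg bs R k c) := by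
  have hRt : R.toNat = (R - 1).toNat + 1 := by omega
  have hlt : ((R - 1).toNat : Int) < R := by omega
  rcases Nat.even_or_odd k with he | ho
  · have hk : k % 2 = 0 := Nat.even_iff.mp he
    have hk1 : (k + 1) % 2 = 1 := by omega
    have hcast : (((R - 1).toNat : Int)) = R - 1 := by omega
    have e1 : pvRowOf R k = R - 1 := by simp [pvRowOf, hk]
    have e2 : pvDirOf k = -1 := by simp [pvDirOf, hk]
    have e3 : pvRowOf R (k + 1) = 0 := by simp [pvRowOf, hk1]
    have e4 : pvDirOf (k + 1) = 1 := by simp [pvDirOf, hk1]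
    have e5 : pvSeg bs R k c = pvSegDown bs c (R - 1).toNat := by simp [pvSeg, hk]
    rw [e1, e2, e3, e4, e5, hRt]
    have hd := pv_inner_down bs R c (R - 1).toNat hlt p
    rw [hcast] at hd
    exact hd
  · have hk : k % 2 = 1 := Nat.odd_iff.mp ho
    have hk1 : (k + 1) % 2 = 0 := by omega
    have hcast : (R - 1 - ((R - 1).toNat : Int)) = 0 := by omega
    have e1 : pvRowOf R k = 0 := by simp [pvRowOf, hk]
    have e2 : pvDirOf k = 1 := by simp [pvDirOf, hk]
    have e3 : pvRowOf R (k + 1) = R - 1 := by simp [pvRowOf, hk1]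
    have e4 : pvDirOf (k + 1) = -1 := by simp [pvDirOf, hk1]
    have e5 : pvSeg bs R k c = pvSegUp bs R c (R - 1).toNat := by
      simp [pvSeg, hk]
    rw [e1, e2, e3, e4, e5, hRt]
    have hu := pv_inner_up bs R c (R - 1).toNat hlt p
    rw [hcast] at hu
    exact hu

-- m full passes starting at parity k
theorem pv_passes (bs : List (List Int)) (R : Int) (hR : 1 ≤ R) :
    ∀ (m k : Nat) (c : Int) (p : List Int),
      (pvStepA bs R)^[R.toNat * m] (pvRowOf R k, c, pvDirOf k, p)
        = (pvRowOf R (k + m), c - m, pvDirOf (k + m),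
           p ++ (List.range m).flatMap (fun i => pvSeg bs R (k + i) (c - i))) := by
  intro m
  induction m with
  | zero => intro k c p; simp
  | succ m ih =>
      intro k c p
      have hsplit : R.toNat * (m + 1) = R.toNat * m + R.toNat := by ring
      rw [hsplit, Function.iterate_add_apply, pv_pass bs R hR k c p, ih (k + 1)]
      have hfeq : (fun i : Nat => pvSeg bs R (k + 1 + i) (c - 1 - (i : Int)))
          = (fun i : Nat => pvSeg bs R (k + Nat.succ i) (c - ((Nat.succ i : Nat) : Int))) := by
        funext i
        have h1 : k + 1 + i = k + Nat.succ i := by omega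
        have h2 : c - 1 - (i : Int) = c - ((Nat.succ i : Nat) : Int) := by push_cast; ring
        rw [h1, h2]
      simp only [Prod.mk.injEq]
      refine ⟨by congr 1; omega, by push_cast; ring, by congr 1; omega, ?_⟩
      rw [List.range_succ_eq_map, List.flatMap_cons, List.flatMap_map, List.append_assoc, hfeq]
      norm_num

-- B's down-pass segment: the countdown range, mapped, is pvSegDown
theorem pv_map_down (bs : List (List Int)) (c : Int) :
    ∀ (j : Nat), (PySem.List.pyRange (j : Int) (-1) (-1)).map (fun r => pvGetA bs r c)
      = pvSegDown bs c j := by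
  intro j
  induction j with
  | zero =>
      simp only [Nat.cast_zero]
      rw [PySem.List.pyRange_neg_one_cons (by norm_num),
        PySem.List.pyRange_neg_one_eq_nil (by norm_num)]
      simp [pvSegDown]
  | succ j ih =>
      rw [PySem.List.pyRange_neg_one_cons (by push_cast; omega)]
      have hc : ((j + 1 : Nat) : Int) - 1 = (j : Int) := by push_cast; ring
      rw [hc]
      simp only [List.map_cons, ih, pvSegDown]

-- B's up-pass segment: the count-up range, mapped, is pvSegUp
theorem pv_map_up (bs : List (List Int)) (R c : Int) :
    ∀ (j : Nat), (j : Int) < R →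
      (PySem.List.pyRange (R - 1 - (j : Int)) R 1).map (fun r => pvGetA bs r c)
        = pvSegUp bs R c j := by
  intro j
  induction j with
  | zero =>
      intro _
      have hs : PySem.List.pyRange (R - 1) R 1 = [R - 1] := by
        have h := PySem.List.pyRange_one_singleton (R - 1)
        rw [sub_add_cancel] at h
        exact h
      rw [show R - 1 - ((0 : Nat) : Int) = R - 1 by push_cast; ring, hs]
      simp [pvSegUp]
  | succ j ih =>
      intro hj
      rw [PySem.List.pyRange_one_cons (by omega)]
      have hc : R - 1 - ((j + 1 : Nat) : Int) + 1 = R - 1 - (j : Int) := by push_cast; ring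
      rw [hc]
      simp only [List.map_cons, ih (by omega), pvSegUp]

-- B's whole result as a flatMap of per-column segments
theorem pv_alt_eq_flatMap (bs : List (List Int)) (hR : 1 ≤ (bs.length : Int)) :
    bookshelfTraversal_alt bs
      = (List.range (PySem.List.pyGetD bs 0 []).length).flatMap
          (fun i => pvSeg bs (bs.length : Int) i
            (((PySem.List.pyGetD bs 0 []).length : Int) - 1 - (i : Int))) := by
  simp only [bookshelfTraversal_alt]
  rw [PySem.List.pyRange_zero_nat (PySem.List.pyGetD bs 0 []).length, List.foldl_map]
  refine Eq.trans (List.foldl_ext _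
    (fun path i => path ++ pvSeg bs (bs.length : Int) i
      (((PySem.List.pyGetD bs 0 []).length : Int) - 1 - (i : Int))) [] ?_) ?_
  · intro acc i _
    have hmod : PySem.Int.mod (i : Int) 2 = ((i % 2 : Nat) : Int) := by
      exact_mod_cast PySem.Int.mod_natCast i 2
    by_cases hp : i % 2 = 0
    · have hcond : (PySem.Int.mod (i : Int) 2 == 0) = true := by
        rw [hmod, hp]; decide  -- placeholder; may need norm_num
      simp only [hcond, if_true]
      rw [PySem.List.foldl_append_singleton_eq_map]
      congr 1
      have hcast : ((((bs.length : Int) - 1).toNat : Int)) = (bs.length : Int) - 1 := by omega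
      rw [← hcast, pv_map_down]
      simp [pvSeg, hp]
    · have hp1 : i % 2 = 1 := by omega
      have hcond : (PySem.Int.mod (i : Int) 2 == 0) = false := by
        rw [hmod, hp1]; decide
      simp only [hcond, Bool.false_eq_true, if_false]
      rw [PySem.List.foldl_append_singleton_eq_map]
      congr 1
      have hu := pv_map_up bs (bs.length : Int)
        (((PySem.List.pyGetD bs 0 []).length : Int) - 1 - (i : Int))
        (((bs.length : Int) - 1).toNat) (by omega)
      rw [show (bs.length : Int) - 1 - ((((bs.length : Int) - 1).toNat : Int)) = 0 from by omega] at hu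
      rw [hu]
      simp [pvSeg, hp1]
  · rw [PySem.List.foldl_append_eq_flatMap]
    simp

-- the main equation: A's state machine produces exactly B's nested-loop output
theorem pv_main (bs : List (List Int)) (hbs : bs ≠ []) :
    bookshelfTraversal bs = bookshelfTraversal_alt bs := by
  have hl : 0 < bs.length := by cases bs with
    | nil => exact absurd rfl hbs
    | cons x xs => simp
  have hR : 1 ≤ (bs.length : Int) := by omega
  simp only [bookshelfTraversal]
  rw [pv_foldl_const]
  have hlen : (PySem.List.pyRange 0 ((bs.length : Int) * ((PySem.List.pyGetD bs 0 []).length : Int)) 1).length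
      = (bs.length : Int).toNat * (PySem.List.pyGetD bs 0 []).length := by
    rw [PySem.List.length_pyRange_one]
    have h2 : ((bs.length : Int) * ((PySem.List.pyGetD bs 0 []).length : Int) - 0)
        = ((bs.length * (PySem.List.pyGetD bs 0 []).length : Nat) : Int) := by push_cast; ring
    rw [h2, Int.toNat_natCast]
    simp
  rw [hlen]
  have h0 := pv_passes bs (bs.length : Int) hR (PySem.List.pyGetD bs 0 []).length 0
    (((PySem.List.pyGetD bs 0 []).length : Int) - 1) []
  have e1 : pvRowOf (bs.length : Int) 0 = (bs.length : Int) - 1 := by simp [pvRowOf]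
  have e2 : pvDirOf 0 = -1 := by simp [pvDirOf]
  rw [e1, e2] at h0
  rw [h0]
  rw [pv_alt_eq_flatMap bs hR]
  simp

-- ===== VERDICT (by name: the statement is the Claim_ definition above) =====
theorem bookshelfTraversal_spec : Claim_equal_bookshelfTraversal := by
  intro bs _ hpre
  unfold Spec_bookshelfTraversal
  exact pv_main bs hpre.1
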